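-- pv_equiv track=rewrite | github.com/alvinyoo/SSW810-HWK | HW07/HW07.py | web_analyzer
-- ===== SOURCE A (Python) =====
-- from typing import List, Tuple, DefaultDict, Any
-- from collections import Counter, defaultdict
--
-- def web_analyzer(weblogs: List[Tuple[str, str]]) -> List[Tuple[str, List[str]]]:
--         """
--         create a summary of the weblogs with each distinct site
--         and a sorted list of names of distinct people who visited that site
--         """
--         weblogs = set(weblogs)
--         summary: DefaultDict[Any, List] = defaultdict(list)
--         name: str
--         web: str
--         for name, web in weblogs:
--             summary[web].append(name)
--
--         for key in summary:
--             lst = summary[key]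
--             lst.sort()
--             summary[key] = lst
--
--         res = []
--         for key in summary:
--             lst = summary[key]
--             tup = (key, lst)
--             res.append(tup)
--
--         res.sort(key=lambda item: item[0])
--
--         return res
-- ===== SOURCE B (Python) =====
-- def web_analyzer(weblogs):
--     """Summary of distinct sites with the sorted distinct visitor names per site."""
--     logs = set(weblogs)
--     return [(web, sorted({name for name, w in logs if w == web}))
--             for web in sorted({w for _, w in logs})]
-- ===== Notes on version B (the rewrite author's own statement) =====
-- stated objective: idiomatic
-- what changed: Replaces the defaultdict bucketing loop, the in-place per-bucket sort loop, the items-building loop and the final sort with a single comprehension: sort the set of distinct sites once and, per site, build its sorted set of visitor names directly.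
import Mathlib
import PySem

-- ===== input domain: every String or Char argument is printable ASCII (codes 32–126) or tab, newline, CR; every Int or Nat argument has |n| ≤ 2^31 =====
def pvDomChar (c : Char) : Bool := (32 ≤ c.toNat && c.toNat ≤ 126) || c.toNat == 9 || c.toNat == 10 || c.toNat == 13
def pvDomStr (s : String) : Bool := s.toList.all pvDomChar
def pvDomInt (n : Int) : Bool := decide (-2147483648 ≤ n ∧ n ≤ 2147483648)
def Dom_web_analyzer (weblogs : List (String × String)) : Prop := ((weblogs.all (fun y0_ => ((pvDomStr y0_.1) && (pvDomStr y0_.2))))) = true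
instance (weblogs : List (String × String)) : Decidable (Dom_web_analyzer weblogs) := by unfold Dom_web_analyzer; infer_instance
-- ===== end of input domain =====

-- B replaces A's defaultdict bucketing, per-bucket sort loop and final sort with one
-- comprehension over the sorted set of sites, each paired with its sorted set of names (idiomatic).


-- ===== PORT A =====
-- set iteration feeds only a dict that is later sorted key-wise with sorted value
-- lists, so the result does not depend on the set's iteration order.
def web_analyzer (weblogs : List (String × String)) : List (String × List String) :=
  let s : PySem.Set (String × String) := PySem.Set.ofList weblogs
  -- for name, web in weblogs: summary[web].append(name)   (defaultdict(list))
  let summary := s.foldl (fun d p => d.modify p.2 [] (fun l => l ++ [p.1])) PySem.Dict.empty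
  -- for key in summary: summary[key] = sorted list
  let summary2 := summary.keys.foldl
    (fun d k => d.insert k (PySem.List.sorted (d.getD k []) (fun x => x) false)) summary
  -- res = list of (key, lst); res.sort(key=item[0])
  let res := summary2.items
  PySem.List.sorted res (fun it => it.1) false

-- ===== PORT B =====
def web_analyzer_alt (weblogs : List (String × String)) : List (String × List String) :=
  let logs : PySem.Set (String × String) := PySem.Set.ofList weblogs
  (PySem.List.sorted (PySem.Set.ofList (logs.map (fun p => p.2))) (fun w => w) false).map
    (fun web => (web,
      PySem.List.sorted
        (PySem.Set.ofList ((logs.filter (fun p => p.2 == web)).map (fun p => p.1)))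
        (fun n => n) false))

-- ===== PRECONDITION & SPEC =====
def Spec_web_analyzer (weblogs : List (String × String)) (out : List (String × List String)) : Prop := out = web_analyzer_alt weblogs
instance (weblogs : List (String × String)) (out : List (String × List String)) : Decidable (Spec_web_analyzer weblogs out) := by unfold Spec_web_analyzer; infer_instance

-- ===== CLAIM (what is proved, stated in full; the proofs are below) =====
def Claim_equal_web_analyzer : Prop := ∀ (weblogs : List (String × String)), Dom_web_analyzer weblogs → Spec_web_analyzer weblogs (web_analyzer weblogs)

-- ===== LEMMAS AND PROOFS =====

-- A's bucketing loop, keyed by the second component: value at w is the names of w in order.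
theorem getD_bucket (l : List (String × String)) (d : PySem.Dict String (List String)) (w : String) :
    (l.foldl (fun d p => d.modify p.2 [] (fun v => v ++ [p.1])) d).getD w []
    = d.getD w [] ++ (l.filter (fun p => p.2 == w)).map (fun p => p.1) := by
  have h := PySem.Dict.getD_foldl_modify_append (l.map (fun p => (p.2, p.1))) d w
  rw [List.foldl_map] at h
  simpa [List.filter_map, Function.comp_def] using h

-- Pure set update with already-present elements is the identity.
theorem set_update_self (xs s : List String) (h : ∀ x ∈ xs, x ∈ s) :
    PySem.Set.update s xs = s := by
  induction xs generalizing s with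
  | nil => rfl
  | cons x xs ih =>
    have hx : x ∈ s := h x (by simp)
    have : PySem.Set.add s x = s := by
      simp [PySem.Set.add, PySem.Set.contains, hx]
    simp only [PySem.Set.update, List.foldl_cons]
    rw [this]
    exact ih s (fun y hy => h y (by simp [hy]))

-- A's value-sorting pass, read back at a key.
theorem getD_sortpass (ks : List String) (d : PySem.Dict String (List String)) (k : String) :
    (ks.foldl (fun d k => d.insert k (PySem.List.sorted (d.getD k []) (fun x => x) false)) d).getD k []
    = if k ∈ ks then PySem.List.sorted (d.getD k []) (fun x => x) false else d.getD k [] := by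
  induction ks generalizing d with
  | nil => simp
  | cons k' ks ih =>
    rw [List.foldl_cons, ih]
    by_cases hk : k = k'
    · subst hk
      simp [PySem.List.sorted_sorted]
    · simp [PySem.Dict.getD_insert, hk, List.mem_cons]

-- the distinct names visiting site w, in the dedup'd log order
theorem names_nodup (S : List (String × String)) (hS : S.Nodup) (w : String) :
    ((S.filter (fun p => p.2 == w)).map (fun p => p.1)).Nodup := by
  refine (hS.filter _).map_on ?_
  intro a ha b hb hab
  have ha2 : a.2 = w := by simpa using (List.of_mem_filter ha)
  have hb2 : b.2 = w := by simpa using (List.of_mem_filter hb)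
  exact Prod.ext hab (ha2.trans hb2.symm)

theorem web_analyzer_spec : Claim_equal_web_analyzer := by
  intro weblogs _
  unfold Spec_web_analyzer web_analyzer
  set S : List (String × String) := PySem.Set.ofList weblogs with hSdef
  have hSnd : S.Nodup := PySem.Set.nodup_ofList weblogs
  set names : String → List String :=
    fun w => (S.filter (fun p => p.2 == w)).map (fun p => p.1) with hnames
  set G : String → String × List String :=
    fun w => (w, PySem.List.sorted (names w) (fun x => x) false) with hG
  set keysA : List String := PySem.Set.ofList (S.map (fun p => p.2)) with hkeysA
  set summary := S.foldl (fun d p => d.modify p.2 [] (fun l => l ++ [p.1]))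
    (PySem.Dict.empty : PySem.Dict String (List String)) with hsummary
  set summary2 := summary.keys.foldl
    (fun d k => d.insert k (PySem.List.sorted (d.getD k []) (fun x => x) false)) summary with hsummary2
  -- keys of the bucket dict
  have hkeys : summary.keys = keysA := by
    rw [hsummary, PySem.Dict.keys_foldl_modify_key S (fun p => p.2) []
      (fun _ p => fun l => l ++ [p.1]) PySem.Dict.empty, PySem.Dict.keys_empty]
    rfl
  have hkeys2 : summary2.keys = keysA := by
    rw [hsummary2, PySem.Dict.keys_foldl_insert, set_update_self _ _ (fun x hx => hx), hkeys]
  have hknd : keysA.Nodup := PySem.Set.nodup_ofList _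
  -- the items of the final dict
  have hitems : summary2.items = keysA.map G := by
    rw [PySem.Dict.items_eq_map_keys summary2 (hkeys2 ▸ hknd) [], hkeys2]
    refine List.map_congr_left (fun k hk => ?_)
    have hv : summary2.getD k [] = PySem.List.sorted (summary.getD k []) (fun x => x) false := by
      rw [hsummary2, getD_sortpass, hkeys, if_pos hk]
    have hb : summary.getD k [] = names k := by
      rw [hsummary, getD_bucket, PySem.Dict.getD_empty, List.nil_append]
    rw [hv, hb, hG]
  -- B is a map over the strictly sorted distinct sites
  have hBmap : web_analyzer_alt weblogs
      = (PySem.List.sorted keysA (fun w => w) false).map G := by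
    unfold web_analyzer_alt
    refine List.map_congr_left (fun w hw => ?_)
    rw [hG]
    simp only [hnames]
    rw [PySem.Set.ofList_eq_self_of_nodup _ (names_nodup S hSnd w)]
  have hperm : ((PySem.List.sorted keysA (fun w => w) false).map G).Perm (keysA.map G) :=
    (PySem.List.sorted_perm keysA (fun w => w) false).map G
  have hpw : ((PySem.List.sorted keysA (fun w => w) false).map G).Pairwise
      (fun a b => a.1 < b.1) := by
    rw [List.pairwise_map]
    exact PySem.List.sorted_ofList_pairwise_lt (S.map (fun p => p.2))
  show (PySem.List.sorted summary2.items (fun it => it.1) false) = web_analyzer_alt weblogs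
  rw [hitems, hBmap]
  exact PySem.List.sorted_eq_of_perm_of_pairwise_lt _ _ _ hperm hpw
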